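-- pv_equiv track=rewrite | github.com/ashish-1221/archercy_scrapping | wikipedia_competition_bracket_results.py | extract_round_starts
-- ===== SOURCE A (Python) =====
-- def extract_round_starts(grid: list[list[str]]) -> list[tuple[int, str]]:
--     if not grid:
--         return []
--
--     starts: list[tuple[int, str]] = []
--     header = grid[0]
--     previous = ""
--     for index, value in enumerate(header):
--         if value and value != previous:
--             starts.append((index, value))
--         previous = value
--     return starts
-- ===== SOURCE B (Python) =====
-- def extract_round_starts(grid: list[list[str]]) -> list[tuple[int, str]]:
--     if not grid:
--         return []
--     starts: list[tuple[int, str]] = []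
--     rest = grid[0]
--     offset = 0
--     while rest:
--         v = rest[0]
--         k = 1
--         while k < len(rest) and rest[k] == v:
--             k += 1
--         if v:
--             starts.append((offset, v))
--         offset += k
--         rest = rest[k:]
--     return starts
-- ===== Notes on version B (the rewrite author's own statement) =====
-- stated objective: alternative
-- what changed: Replaces the adjacent-comparison pass that carries a 'previous' cell with run-grouping: an outer loop consumes one maximal run of equal cells at a time (inner scan finds the run length) and emits the run's start offset when its value is non-empty.
import Mathlib
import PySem

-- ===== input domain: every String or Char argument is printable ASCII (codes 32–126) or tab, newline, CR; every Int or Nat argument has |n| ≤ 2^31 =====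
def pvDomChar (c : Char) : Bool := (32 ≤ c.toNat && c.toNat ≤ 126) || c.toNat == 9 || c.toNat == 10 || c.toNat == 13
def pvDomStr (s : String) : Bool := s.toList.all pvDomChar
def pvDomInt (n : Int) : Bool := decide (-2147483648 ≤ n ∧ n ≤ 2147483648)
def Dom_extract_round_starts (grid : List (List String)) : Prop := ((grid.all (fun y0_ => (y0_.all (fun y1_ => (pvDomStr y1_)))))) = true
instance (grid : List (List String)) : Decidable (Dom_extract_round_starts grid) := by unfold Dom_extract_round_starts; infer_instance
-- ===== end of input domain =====

-- B replaces A's adjacent-comparison pass (carrying 'previous') with run-grouping: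
-- consume one maximal run of equal header cells at a time and emit its start offset
-- when its value is non-empty (objective: alternative decomposition, same cost).

-- ===== PORT A =====
def extract_round_starts (grid : List (List String)) : List (Int × String) :=
  match grid with
  | [] => []
  | header :: _ =>
    ((PySem.List.enumerate header 0).foldl
      (fun (st : List (Int × String) × String) iv =>
        ((if iv.2 ≠ "" ∧ iv.2 ≠ st.2 then st.1 ++ [(iv.1, iv.2)] else st.1), iv.2))
      ([], "")).1

-- ===== PORT B =====
-- inner while: run length of cells equal to v at the front of the tail
def pvRunLen (v : String) : List String → Nat
  | [] => 0
  | w :: t => if w = v then pvRunLen v t + 1 else 0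

-- outer while: consume one run per step
def pvBLoop : List String → Int → List (Int × String)
  | [], _ => []
  | v :: t, offset =>
      let k : Nat := pvRunLen v t + 1
      (if v ≠ "" then [(offset, v)] else []) ++ pvBLoop ((v :: t).drop k) (offset + (k : Int))
termination_by l => l.length
decreasing_by
  simp only [List.length_drop, List.length_cons]
  omega

def extract_round_starts_alt (grid : List (List String)) : List (Int × String) :=
  match grid with
  | [] => []
  | header :: _ => pvBLoop header 0

-- ===== PRECONDITION & SPEC =====
def Spec_extract_round_starts (grid : List (List String)) (out : List (Int × String)) : Prop := out = extract_round_starts_alt grid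
instance (grid : List (List String)) (out : List (Int × String)) : Decidable (Spec_extract_round_starts grid out) := by unfold Spec_extract_round_starts; infer_instance

-- ===== CLAIM (what is proved, stated in full; the proofs are below) =====
def Claim_equal_extract_round_starts : Prop := ∀ (grid : List (List String)), Dom_extract_round_starts grid → Spec_extract_round_starts grid (extract_round_starts grid)

-- ===== LEMMAS AND PROOFS =====

-- recursive characterisation of A's loop
def pvARec : List String → Int → String → List (Int × String)
  | [], _, _ => []
  | v :: t, i, prev => (if v ≠ "" ∧ v ≠ prev then [(i, v)] else []) ++ pvARec t (i + 1) v

theorem pvFoldA (l : List String) : ∀ (i : Int) (prev : String) (acc : List (Int × String)),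
    ((PySem.List.enumerate l i).foldl
      (fun (st : List (Int × String) × String) iv =>
        ((if iv.2 ≠ "" ∧ iv.2 ≠ st.2 then st.1 ++ [(iv.1, iv.2)] else st.1), iv.2))
      (acc, prev)).1 = acc ++ pvARec l i prev := by
  induction l with
  | nil => intro i prev acc; simp [PySem.List.enumerate_nil, pvARec]
  | cons v t ih =>
    intro i prev acc
    simp only [PySem.List.enumerate_cons, List.foldl_cons, pvARec]
    split_ifs with h <;> simp [ih]

theorem pvSkip (v : String) (t : List String) : ∀ (i : Int),
    pvARec t i v = pvARec (t.drop (pvRunLen v t)) (i + (pvRunLen v t : Int)) v := by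
  induction t with
  | nil => intro i; simp [pvRunLen]
  | cons w t ih =>
    intro i
    by_cases hw : w = v
    · subst hw
      have h1 : pvRunLen w (w :: t) = pvRunLen w t + 1 := by simp [pvRunLen]
      have h2 : pvARec (w :: t) i w = pvARec t (i + 1) w := by simp [pvARec]
      rw [h1, h2, ih (i + 1), List.drop_succ_cons]
      congr 1
      push_cast
      ring
    · simp [pvRunLen, hw, pvARec]

theorem pvHeadDrop (v : String) : ∀ (t : List String) (w : String) (t' : List String),
    t.drop (pvRunLen v t) = w :: t' → w ≠ v := by
  intro t
  induction t with
  | nil => intro w t' h; simp [pvRunLen] at h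
  | cons x xs ih =>
    intro w t' h
    by_cases hx : x = v
    · subst hx
      simp only [pvRunLen] at h
      exact ih w t' h
    · simp only [pvRunLen, if_neg hx, List.drop_zero] at h
      cases h
      exact hx

theorem pvMain : ∀ (n : Nat) (l : List String), l.length ≤ n → ∀ (i : Int) (prev : String),
    (∀ w t', l = w :: t' → (w ≠ prev ∨ w = "")) → pvBLoop l i = pvARec l i prev := by
  intro n
  induction n with
  | zero =>
    intro l hl i prev _
    have : l = [] := List.eq_nil_of_length_eq_zero (Nat.le_zero.mp hl)
    subst this; simp [pvBLoop, pvARec]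
  | succ n ih =>
    intro l hl i prev hhead
    cases l with
    | nil => simp [pvBLoop, pvARec]
    | cons v t =>
      have hcond : (v ≠ "" ∧ v ≠ prev) ↔ v ≠ "" := by
        constructor
        · exact fun h => h.1
        · intro h
          rcases hhead v t rfl with h1 | h1
          · exact ⟨h, h1⟩
          · exact absurd h1 h
      simp only [pvBLoop, pvARec, List.drop_succ_cons]
      have harith : i + ((pvRunLen v t + 1 : Nat) : Int) = (i + 1) + (pvRunLen v t : Int) := by
        push_cast; ring
      rw [harith]
      have hrest : pvBLoop (t.drop (pvRunLen v t)) ((i + 1) + (pvRunLen v t : Int))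
          = pvARec (t.drop (pvRunLen v t)) ((i + 1) + (pvRunLen v t : Int)) v := by
        apply ih
        · have := List.length_drop (l := t) (i := pvRunLen v t)
          simp only [List.length_cons] at hl
          omega
        · intro w t' hw
          exact Or.inl (pvHeadDrop v t w t' hw)
      rw [hrest, ← pvSkip v t (i + 1)]
      by_cases hv : v = ""
      · simp [hv]
      · have : (v ≠ "" ∧ v ≠ prev) := hcond.mpr hv
        simp [hv, this]

-- ===== VERDICT (by name: the statement is the Claim_ definition above) =====
theorem extract_round_starts_spec : Claim_equal_extract_round_starts := by
  intro grid _
  unfold Spec_extract_round_starts extract_round_starts extract_round_starts_alt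
  cases grid with
  | nil => rfl
  | cons header rest =>
    simp only []
    rw [pvFoldA header 0 "" []]
    rw [pvMain header.length header le_rfl 0 ""]
    · simp
    · intro w t' _
      by_cases hw : w = ""
      · exact Or.inr hw
      · exact Or.inl (by simpa using hw)
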